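-- pv_equiv track=rewrite | github.com/c52929/Python_Minigames | hangman.py | update_lives_gauge
-- ===== SOURCE A (Python) =====
-- def update_lives_gauge(lives):
-- 	lives_gauge='['
-- 	for i in range(6):
-- 		if i<lives:
-- 			lives_gauge+=' o'
-- 		else:
-- 			lives_gauge+=' x'
-- 	return lives_gauge+' ]('+str(lives)+'/6)'
-- ===== SOURCE B (Python) =====
-- def update_lives_gauge(lives):
--     n = min(6, max(0, lives))
--     return '[' + ' o' * n + ' x' * (6 - n) + ' ](' + str(lives) + '/6)'
-- ===== Notes on version B (the rewrite author's own statement) =====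
-- stated objective: simpler
-- what changed: Replaces the range(6) loop with per-slot comparisons by a closed-form clamp n = min(6, max(0, lives)) and string repetition ' o'*n + ' x'*(6-n).
import Mathlib
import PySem

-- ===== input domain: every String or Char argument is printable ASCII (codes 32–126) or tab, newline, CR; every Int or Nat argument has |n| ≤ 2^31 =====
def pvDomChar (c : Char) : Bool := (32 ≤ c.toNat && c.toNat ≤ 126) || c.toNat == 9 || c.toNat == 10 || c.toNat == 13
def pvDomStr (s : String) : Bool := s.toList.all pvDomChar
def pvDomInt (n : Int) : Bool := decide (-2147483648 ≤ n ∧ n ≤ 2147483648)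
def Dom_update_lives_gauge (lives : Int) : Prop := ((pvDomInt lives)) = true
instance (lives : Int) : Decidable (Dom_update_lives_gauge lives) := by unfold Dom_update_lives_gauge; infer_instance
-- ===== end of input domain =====

-- B replaces A's six-iteration loop by a closed-form clamp and string repetition (objective: simpler).

-- ===== PORT A =====
def update_lives_gauge (lives : Int) : String :=
  let lives_gauge :=
    (PySem.List.pyRange 0 6 1).foldl
      (fun acc i => if i < lives then acc ++ " o" else acc ++ " x") "["
  lives_gauge ++ " ](" ++ PySem.Int.toStr lives ++ "/6)"

-- ===== PORT B =====
-- ' o' * n  (Python string repetition; '' for n ≤ 0)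
def pvRepeat (s : String) (n : Int) : String :=
  String.join (List.replicate n.toNat s)

def update_lives_gauge_alt (lives : Int) : String :=
  let n := min 6 (max 0 lives)
  "[" ++ pvRepeat " o" n ++ pvRepeat " x" (6 - n) ++ " ](" ++ PySem.Int.toStr lives ++ "/6)"

-- ===== PRECONDITION & SPEC =====
def Spec_update_lives_gauge (lives : Int) (out : String) : Prop := out = update_lives_gauge_alt lives
instance (lives : Int) (out : String) : Decidable (Spec_update_lives_gauge lives out) := by unfold Spec_update_lives_gauge; infer_instance

-- ===== CLAIM (what is proved, stated in full; the proofs are below) =====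
def Claim_equal_update_lives_gauge : Prop := ∀ (lives : Int), Dom_update_lives_gauge lives → Spec_update_lives_gauge lives (update_lives_gauge lives)

-- ===== LEMMAS AND PROOFS =====

-- the pre-"](…" part of each output, as a function of lives
def prefA (lives : Int) : String :=
  (PySem.List.pyRange 0 6 1).foldl
    (fun acc i => if i < lives then acc ++ " o" else acc ++ " x") "["

def prefB (lives : Int) : String :=
  let n := min 6 (max 0 lives)
  "[" ++ pvRepeat " o" n ++ pvRepeat " x" (6 - n)

lemma pref_eq (lives : Int) : prefA lives = prefB lives := by
  have h : lives ≤ 0 ∨ lives = 1 ∨ lives = 2 ∨ lives = 3 ∨ lives = 4 ∨ lives = 5 ∨ 6 ≤ lives := by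
    omega
  rcases h with h | h | h | h | h | h | h
  · have e0 : min 6 (max 0 lives) = 0 := by omega
    simp only [prefA, prefB, e0, PySem.List.pyRange, pvRepeat]
    norm_num [show (6:Int).toNat = 6 from rfl, List.range_succ, List.replicate]
    split_ifs <;> first | rfl | omega
  · subst h; decide
  · subst h; decide
  · subst h; decide
  · subst h; decide
  · subst h; decide
  · have e6 : min 6 (max 0 lives) = 6 := by omega
    simp only [prefA, prefB, e6, PySem.List.pyRange, pvRepeat]
    norm_num [show (6:Int).toNat = 6 from rfl, List.range_succ, List.replicate]
    split_ifs <;> first | rfl | omega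

-- ===== VERDICT (by name: the statement is the Claim_ definition above) =====
theorem update_lives_gauge_spec : Claim_equal_update_lives_gauge := by
  intro lives _
  show update_lives_gauge lives = update_lives_gauge_alt lives
  have h := pref_eq lives
  simp only [update_lives_gauge, update_lives_gauge_alt, prefA, prefB] at h ⊢
  rw [h]
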